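-- pv_equiv track=rewrite | github.com/Akinkunmi100/Team-APRE | recommendation_engine.py | _diversify_recommendations
-- ===== SOURCE A (Python) =====
-- from typing import List, Dict, Any, Optional, Tuple
--
-- def _diversify_recommendations(recommendations: List[Dict]) -> List[Dict]:
--     """Add diversity to recommendations"""
--
--     if len(recommendations) <= 3:
--         return recommendations
--
--     diversified = []
--     seen_brands = set()
--     seen_categories = set()
--
--     # First pass: ensure brand diversity
--     for rec in recommendations:
--         brand = rec.get('brand', '')
--         if brand not in seen_brands or len(diversified) < 3:
--             diversified.append(rec)
--             seen_brands.add(brand)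
--
--     # Add remaining if needed
--     for rec in recommendations:
--         if rec not in diversified and len(diversified) < len(recommendations):
--             diversified.append(rec)
--
--     return diversified
-- ===== SOURCE B (Python) =====
-- def _diversify_recommendations(recommendations):
--     """Add diversity to recommendations.
--
--     Different decomposition: the first three recs are sliced off unconditionally
--     (so no running `len(diversified) < 3` counter is needed), the brand filter
--     runs over the remainder only, and deferred items are appended via a
--     first-occurrence-index dedup comprehension with no length cap (the cap in
--     the original is provably never binding).
--     """
--     if len(recommendations) <= 3:
--         return recommendations
--
--     head, tail = recommendations[:3], recommendations[3:]
--     seen_brands = {r.get('brand', '') for r in head}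
--
--     kept = list(head)
--     held = []
--     for rec in tail:
--         brand = rec.get('brand', '')
--         if brand in seen_brands:
--             held.append(rec)
--         else:
--             kept.append(rec)
--             seen_brands.add(brand)
--
--     extras = [rec for i, rec in enumerate(held)
--               if rec not in kept and held.index(rec) == i]
--     return kept + extras
-- ===== Notes on version B (the rewrite author's own statement) =====
-- stated objective: alternative
-- what changed: B slices off the first three recs unconditionally and seeds the brand set from them (eliminating A's running len<3 counter), branches the remainder on brand only, and replaces A's capped full-list rescan second pass by a first-occurrence-index dedup comprehension over just the deferred items with no length cap (proved redundant).
import Mathlib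
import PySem

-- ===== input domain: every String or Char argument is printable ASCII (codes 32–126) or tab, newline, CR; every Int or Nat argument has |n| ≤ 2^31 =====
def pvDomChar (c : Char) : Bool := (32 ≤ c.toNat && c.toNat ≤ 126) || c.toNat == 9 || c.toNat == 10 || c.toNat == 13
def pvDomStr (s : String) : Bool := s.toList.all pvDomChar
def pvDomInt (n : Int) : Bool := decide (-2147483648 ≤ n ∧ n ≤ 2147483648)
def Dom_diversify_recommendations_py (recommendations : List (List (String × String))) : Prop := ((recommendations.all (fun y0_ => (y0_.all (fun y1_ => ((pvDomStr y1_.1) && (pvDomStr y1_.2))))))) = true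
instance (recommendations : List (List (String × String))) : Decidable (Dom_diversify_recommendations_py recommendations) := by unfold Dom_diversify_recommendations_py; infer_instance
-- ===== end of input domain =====

-- B slices off the first three recs and seeds the brand set from them (no running "< 3"
-- counter), classifies the remainder by brand only, and appends deferred items via a
-- first-occurrence-index dedup over just those items, with no length cap; objective:
-- alternative decomposition, returning exactly A's value.

-- ===== PORT A =====
-- rec.get(k) for the Python dict built from the association list `rec`
-- (hand-ported, exact: in a dict literal/constructor the LAST occurrence of a key wins).
def pyRecGet? (rec : List (String × String)) (k : String) : Option String :=
  (rec.reverse.find? (fun p => p.1 == k)).map Prod.snd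

-- rec.get(k, dflt)
def pyRecGetD (rec : List (String × String)) (k dflt : String) : String :=
  (pyRecGet? rec k).getD dflt

-- Python `==` on two dicts built from the association lists r1 r2
-- (hand-ported, exact: equal iff the key→value maps agree, i.e. they agree on every mentioned key).
def pyDictEq (r1 r2 : List (String × String)) : Bool :=
  (r1 ++ r2).all (fun p => pyRecGet? r1 p.1 == pyRecGet? r2 p.1)

-- A's first loop: `for rec in recommendations: …` building (diversified, seen_brands)
def passA_py : List (List (String × String)) → List (List (String × String)) → PySem.Set String →
    List (List (String × String)) × PySem.Set String
  | [], diversified, seen => (diversified, seen)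
  | rec :: rest, diversified, seen =>
    if !(PySem.Set.contains seen (pyRecGetD rec "brand" "")) || diversified.length < 3 then
      passA_py rest (diversified ++ [rec]) (PySem.Set.add seen (pyRecGetD rec "brand" ""))
    else
      passA_py rest diversified seen

-- A's second loop: `for rec in recommendations: if rec not in diversified and len(diversified) < n: …`
def fillA_py (n : Nat) : List (List (String × String)) → List (List (String × String)) →
    List (List (String × String))
  | [], diversified => diversified
  | rec :: rest, diversified =>
    if !(diversified.any (fun d => pyDictEq rec d)) && diversified.length < n then
      fillA_py n rest (diversified ++ [rec])
    else
      fillA_py n rest diversified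

def diversify_recommendations_py (recommendations : List (List (String × String))) : List (List (String × String)) :=
  if recommendations.length ≤ 3 then recommendations
  else fillA_py recommendations.length recommendations (passA_py recommendations [] PySem.Set.empty).1

-- ===== PORT B =====
-- B's classifying loop over the tail only: brand already seen → held, else → kept (+ record brand)
def bClassify_py : List (List (String × String)) → List (List (String × String)) → PySem.Set String →
    List (List (String × String)) →
    List (List (String × String)) × PySem.Set String × List (List (String × String))
  | [], kept, seen, held => (kept, seen, held)
  | rec :: rest, kept, seen, held =>
    if PySem.Set.contains seen (pyRecGetD rec "brand" "") then
      bClassify_py rest kept seen (held ++ [rec])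
    else
      bClassify_py rest (kept ++ [rec]) (PySem.Set.add seen (pyRecGetD rec "brand" "")) held

-- held.index(rec): first index whose element is dict-equal to rec
-- (hand-ported because Python's list.index compares with dict ==, not structural equality).
def dictIndexAux_py (r : List (String × String)) : List (List (String × String)) → Int → Option Int
  | [], _ => none
  | d :: t, i => if pyDictEq d r then some i else dictIndexAux_py r t (i + 1)

def diversify_recommendations_py_alt (recommendations : List (List (String × String))) : List (List (String × String)) :=
  if recommendations.length ≤ 3 then recommendations
  else
    let head := PySem.List.slice recommendations none (some (3 : Int))   -- recommendations[:3]
    let tail := PySem.List.slice recommendations (some (3 : Int)) none   -- recommendations[3:]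
    let seen := PySem.Set.ofList (head.map (fun r => pyRecGetD r "brand" ""))
    let res := bClassify_py tail head seen []
    let kept := res.1
    let held := res.2.2
    kept ++ ((PySem.List.enumerate held 0).filter
      (fun p => !(kept.any (fun d => pyDictEq p.2 d)) && (dictIndexAux_py p.2 held 0 == some p.1))).map Prod.snd

-- ===== PRECONDITION & SPEC =====
def Spec_diversify_recommendations_py (recommendations : List (List (String × String))) (out : List (List (String × String))) : Prop := out = diversify_recommendations_py_alt recommendations
instance (recommendations : List (List (String × String))) (out : List (List (String × String))) : Decidable (Spec_diversify_recommendations_py recommendations out) := by unfold Spec_diversify_recommendations_py; infer_instance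

-- ===== CLAIM (what is proved, stated in full; the proofs are below) =====
def Claim_equal_diversify_recommendations_py : Prop := ∀ (recommendations : List (List (String × String))), Dom_diversify_recommendations_py recommendations → Spec_diversify_recommendations_py recommendations (diversify_recommendations_py recommendations)

-- ===== LEMMAS AND PROOFS =====

-- membership by Python dict equality (proof-side abbreviation for the ports' `any` tests)
def inEq (r : List (String × String)) (l : List (List (String × String))) : Bool :=
  l.any (fun d => pyDictEq r d)

theorem inEq_def (r : List (String × String)) (l : List (List (String × String))) :
    l.any (fun d => pyDictEq r d) = inEq r l := rfl

theorem inEq_append (r : List (String × String)) (l1 l2 : List (List (String × String))) :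
    inEq r (l1 ++ l2) = (inEq r l1 || inEq r l2) := by
  simp [inEq, List.any_append]

theorem inEq_singleton (r h : List (String × String)) : inEq r [h] = pyDictEq r h := by
  simp [inEq]

theorem pyDictEq_refl (r : List (String × String)) : pyDictEq r r = true := by
  simp [pyDictEq, List.all_eq_true]

theorem pyDictEq_iff (r1 r2 : List (String × String)) :
    pyDictEq r1 r2 = true ↔ ∀ p ∈ r1 ++ r2, pyRecGet? r1 p.1 = pyRecGet? r2 p.1 := by
  unfold pyDictEq
  rw [List.all_eq_true]
  constructor
  · intro h p hp; simpa using h p hp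
  · intro h p hp; simpa using h p hp

theorem pyRecGet?_isSome_of_mem {r : List (String × String)} {p : String × String}
    (h : p ∈ r) : ∃ w, pyRecGet? r p.1 = some w := by
  have : (r.reverse.find? (fun q => q.1 == p.1)).isSome := by
    rw [List.find?_isSome]
    exact ⟨p, List.mem_reverse.mpr h, by simp⟩
  obtain ⟨q, hq⟩ := Option.isSome_iff_exists.mp this
  exact ⟨q.2, by simp [pyRecGet?, hq]⟩

theorem pyRecGet?_some_mem {r : List (String × String)} {k w : String}
    (h : pyRecGet? r k = some w) : (k, w) ∈ r := by
  unfold pyRecGet? at h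
  obtain ⟨q, hq, hq2⟩ := Option.map_eq_some_iff.mp h
  have hmem := List.mem_reverse.mp (List.mem_of_find?_eq_some hq)
  have hkey : q.1 = k := by simpa using List.find?_some hq
  have : q = (k, w) := by cases q; simp_all
  rwa [this] at hmem

theorem pyDictEq_symm {r1 r2 : List (String × String)}
    (h : pyDictEq r1 r2 = true) : pyDictEq r2 r1 = true := by
  rw [pyDictEq_iff] at h ⊢
  intro p hp
  have : p ∈ r1 ++ r2 := by simp at hp ⊢; tauto
  exact (h p this).symm

theorem pyDictEq_trans {a b c : List (String × String)}
    (hab : pyDictEq a b = true) (hbc : pyDictEq b c = true) : pyDictEq a c = true := by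
  rw [pyDictEq_iff] at hab hbc ⊢
  intro p hp
  rcases List.mem_append.mp hp with hpa | hpc
  · have h1 : pyRecGet? a p.1 = pyRecGet? b p.1 := hab p (List.mem_append.mpr (Or.inl hpa))
    obtain ⟨w, hw⟩ := pyRecGet?_isSome_of_mem hpa
    have hwb : pyRecGet? b p.1 = some w := by rw [← h1, hw]
    have hmem : (p.1, w) ∈ b := pyRecGet?_some_mem hwb
    have h2 : pyRecGet? b p.1 = pyRecGet? c p.1 := by
      have := hbc (p.1, w) (List.mem_append.mpr (Or.inl hmem))
      simpa using this
    rw [h1, h2]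
  · have h2 : pyRecGet? b p.1 = pyRecGet? c p.1 := hbc p (List.mem_append.mpr (Or.inr hpc))
    obtain ⟨w, hw⟩ := pyRecGet?_isSome_of_mem hpc
    have hwb : pyRecGet? b p.1 = some w := by rw [h2, hw]
    have hmem : (p.1, w) ∈ b := pyRecGet?_some_mem hwb
    have h1 : pyRecGet? a p.1 = pyRecGet? b p.1 := by
      have := hab (p.1, w) (List.mem_append.mpr (Or.inr hmem))
      simpa using this
    rw [h1, h2]

-- if r is dict-equal to h and h is inEq l, then r is inEq l
theorem inEq_trans {r h : List (String × String)} {l : List (List (String × String))}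
    (hd : pyDictEq r h = true) (hl : inEq h l = true) : inEq r l = true := by
  unfold inEq at hl ⊢
  obtain ⟨d, hdl, hde⟩ := List.any_eq_true.mp hl
  exact List.any_eq_true.mpr ⟨d, hdl, pyDictEq_trans hd hde⟩

-- ---- relating A's first pass to B's classification ----

-- proof-side replica of A's first-pass state machine carrying a held accumulator
def classifyC : List (List (String × String)) → List (List (String × String)) → PySem.Set String →
    List (List (String × String)) →
    List (List (String × String)) × PySem.Set String × List (List (String × String))
  | [], kept, seen, held => (kept, seen, held)
  | rec :: rest, kept, seen, held =>
    if !(PySem.Set.contains seen (pyRecGetD rec "brand" "")) || kept.length < 3 then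
      classifyC rest (kept ++ [rec]) (PySem.Set.add seen (pyRecGetD rec "brand" "")) held
    else
      classifyC rest kept seen (held ++ [rec])

-- kept only grows during classification
theorem classifyC_kept_prefix (l : List (List (String × String))) :
    ∀ k s h, ∃ t, (classifyC l k s h).1 = k ++ t := by
  induction l with
  | nil => intro k s h; exact ⟨[], by simp [classifyC]⟩
  | cons rec rest ih =>
    intro k s h
    simp only [classifyC]
    split
    · obtain ⟨t, ht⟩ := ih (k ++ [rec]) (PySem.Set.add s (pyRecGetD rec "brand" "")) h
      exact ⟨[rec] ++ t, by simpa using ht⟩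
    · exact ih k s (h ++ [rec])

-- A's first pass computes the kept/seen components of the classification
theorem passA_eq_classifyC (l : List (List (String × String))) :
    ∀ k s h, passA_py l k s = ((classifyC l k s h).1, (classifyC l k s h).2.1) := by
  induction l with
  | nil => intro k s h; simp [passA_py, classifyC]
  | cons rec rest ih =>
    intro k s h
    simp only [passA_py, classifyC]
    split
    · exact ih _ _ h
    · exact ih k s (h ++ [rec])

-- the held accumulator is a pure accumulator: kept/seen ignore it, held is appended to it
theorem classifyC_held_acc (l : List (List (String × String))) :
    ∀ k s h, classifyC l k s h =
      ((classifyC l k s []).1, (classifyC l k s []).2.1, h ++ (classifyC l k s []).2.2) := by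
  induction l with
  | nil => intro k s h; simp [classifyC]
  | cons rec rest ih =>
    intro k s h
    simp only [classifyC]
    split
    · exact ih _ _ h
    · rw [ih k s (h ++ [rec]), ih k s ([] ++ [rec])]
      simp

-- every input rec ends in kept or in held
theorem classifyC_length (l : List (List (String × String))) :
    ∀ k s h, (classifyC l k s h).1.length + (classifyC l k s h).2.2.length
      = k.length + h.length + l.length := by
  induction l with
  | nil => intro k s h; simp [classifyC]
  | cons rec rest ih =>
    intro k s h
    simp only [classifyC]
    split
    · rw [ih]; simp; omega
    · rw [ih]; simp; omega

-- the first three recs are kept unconditionally (len(diversified) < 3)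
theorem classifyC_start (a b c : List (String × String)) (rest : List (List (String × String))) :
    classifyC (a :: b :: c :: rest) [] PySem.Set.empty [] =
      classifyC rest [a, b, c]
        (PySem.Set.add (PySem.Set.add (PySem.Set.add PySem.Set.empty (pyRecGetD a "brand" ""))
          (pyRecGetD b "brand" "")) (pyRecGetD c "brand" "")) [] := by
  simp [classifyC]

-- once kept has ≥ 3 elements, A's first-pass condition degenerates to the brand test
theorem classifyC_eq_bClassify (l : List (List (String × String))) :
    ∀ k s h, 3 ≤ k.length → classifyC l k s h = bClassify_py l k s h := by
  induction l with
  | nil => intro k s h _; simp [classifyC, bClassify_py]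
  | cons rec rest ih =>
    intro k s h hk
    simp only [classifyC, bClassify_py]
    by_cases hc : pyRecGetD rec "brand" "" ∈ s
    · rw [if_neg (by simp [hc]; omega), if_pos (by simpa using hc)]
      exact ih k s (h ++ [rec]) hk
    · rw [if_pos (by simp [hc]), if_neg (by simpa using hc)]
      exact ih (k ++ [rec]) _ h (by simp; omega)

-- ---- relating A's second pass to a fold over held only ----

-- if every finally-kept element is already a member of the accumulator,
-- A's rescan over the whole list equals a fold over only the held items
theorem fillA_eq_foldl_held (n : Nat) (l : List (List (String × String))) :
    ∀ k s acc, (∀ r ∈ (classifyC l k s []).1, r ∈ acc) →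
      fillA_py n l acc =
        ((classifyC l k s []).2.2).foldl (fun result rec =>
          if !(result.any (fun d => pyDictEq rec d)) && result.length < n then
            result ++ [rec]
          else result) acc := by
  induction l with
  | nil => intro k s acc _; rfl
  | cons rec rest ih =>
    intro k s acc hacc
    simp only [classifyC] at hacc ⊢
    by_cases hc : (!(PySem.Set.contains s (pyRecGetD rec "brand" "")) || decide (k.length < 3)) = true
    · rw [if_pos hc] at hacc ⊢
      have hrec : rec ∈ acc := by
        apply hacc
        obtain ⟨t, ht⟩ := classifyC_kept_prefix rest (k ++ [rec])
          (PySem.Set.add s (pyRecGetD rec "brand" "")) []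
        rw [ht]; simp
      have hany : (acc.any (fun d => pyDictEq rec d)) = true :=
        List.any_eq_true.mpr ⟨rec, hrec, pyDictEq_refl rec⟩
      have hskip : fillA_py n (rec :: rest) acc = fillA_py n rest acc := by
        simp [fillA_py, hany]
      rw [hskip]
      exact ih _ _ acc hacc
    · rw [if_neg hc] at hacc ⊢
      simp only [List.nil_append] at hacc ⊢
      rw [classifyC_held_acc rest k s [rec]] at hacc ⊢
      simp only [List.singleton_append, List.foldl_cons]
      have step : fillA_py n (rec :: rest) acc =
          fillA_py n rest (if !(acc.any (fun d => pyDictEq rec d)) && acc.length < n then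
            acc ++ [rec] else acc) := by
        simp only [fillA_py]; split <;> simp_all
      rw [step]
      apply ih
      intro r hr
      have := hacc r hr
      split <;> simp_all

-- recursive characterisation of "first occurrence among held, not already in kept"
def goSpec (kept : List (List (String × String))) :
    List (List (String × String)) → List (List (String × String)) → List (List (String × String))
  | _, [] => []
  | pre, h :: t =>
    if !(inEq h kept) && !(inEq h pre) then h :: goSpec kept (pre ++ [h]) t
    else goSpec kept (pre ++ [h]) t

-- A's fold over held (accumulator kept ++ ex; the cap n is never binding) equals kept ++ ex ++ goSpec
theorem foldA_eq_goSpec (n : Nat) (kept : List (List (String × String))) :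
    ∀ (rest ex pre : List (List (String × String))),
      kept.length + ex.length + rest.length ≤ n →
      (∀ r, inEq r ex = (!(inEq r kept) && inEq r pre)) →
      rest.foldl (fun result rec =>
          if !(result.any (fun d => pyDictEq rec d)) && result.length < n then
            result ++ [rec]
          else result) (kept ++ ex)
        = (kept ++ ex) ++ goSpec kept pre rest := by
  intro rest
  induction rest with
  | nil => intro ex pre _ _; simp [goSpec]
  | cons h t ih =>
    intro ex pre hlen hinv
    simp only [List.foldl_cons, goSpec]
    rw [inEq_def]
    have hlt : (kept ++ ex).length < n := by simp at hlen ⊢; omega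
    have hcond : (!(inEq h (kept ++ ex)) && decide ((kept ++ ex).length < n))
        = (!(inEq h kept) && !(inEq h pre)) := by
      rw [inEq_append, hinv h, decide_eq_true hlt]
      cases inEq h kept <;> cases inEq h pre <;> simp
    rw [hcond]
    by_cases hc : (!(inEq h kept) && !(inEq h pre)) = true
    · have hKP := hc
      rw [Bool.and_eq_true, Bool.not_eq_true', Bool.not_eq_true'] at hKP
      obtain ⟨hK, hP⟩ := hKP
      rw [if_pos hc, if_pos hc]
      have hinv' : ∀ r, inEq r (ex ++ [h]) = (!(inEq r kept) && inEq r (pre ++ [h])) := by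
        intro r
        rw [inEq_append, inEq_append, hinv r, inEq_singleton]
        by_cases hD : pyDictEq r h = true
        · have hKr : inEq r kept = false := by
            cases hKK : inEq r kept with
            | false => rfl
            | true => exact absurd (inEq_trans (pyDictEq_symm hD) hKK) (by simp [hK])
          rw [hD, hKr]; simp
        · have hD' : pyDictEq r h = false := by simpa using hD
          rw [hD']; simp
      have heq : (kept ++ ex) ++ [h] = kept ++ (ex ++ [h]) := by simp
      rw [heq, ih (ex ++ [h]) (pre ++ [h]) (by simp at hlen ⊢; omega) hinv']
      simp
    · have hor : inEq h kept = true ∨ inEq h pre = true := by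
        cases hK : inEq h kept with
        | true => exact Or.inl rfl
        | false =>
          cases hP : inEq h pre with
          | true => exact Or.inr rfl
          | false => rw [hK, hP] at hc; simp at hc
      rw [if_neg hc, if_neg hc]
      have hinv' : ∀ r, inEq r ex = (!(inEq r kept) && inEq r (pre ++ [h])) := by
        intro r
        rw [inEq_append, hinv r, inEq_singleton]
        by_cases hD : pyDictEq r h = true
        · rcases hor with hHK | hHP
          · have hKr : inEq r kept = true := inEq_trans hD hHK
            rw [hKr]; simp
          · have hPr : inEq r pre = true := inEq_trans hD hHP
            rw [hPr]; simp
        · have hD' : pyDictEq r h = false := by simpa using hD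
          rw [hD']; simp
      exact ih ex (pre ++ [h]) (by simp at hlen ⊢; omega) hinv'

-- ---- relating B's index-dedup comprehension to goSpec ----

theorem dictIndexAux_none_iff (r : List (String × String)) :
    ∀ (l : List (List (String × String))) (b : Int),
      dictIndexAux_py r l b = none ↔ inEq r l = false := by
  intro l
  induction l with
  | nil => intro b; simp [dictIndexAux_py, inEq]
  | cons d t ih =>
    intro b
    simp only [dictIndexAux_py, inEq, List.any_cons]
    by_cases hd : pyDictEq d r = true
    · have hrd : pyDictEq r d = true := pyDictEq_symm hd
      simp [hd, hrd]
    · have hd' : pyDictEq d r = false := by simpa using hd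
      have hrd : pyDictEq r d = false := by
        cases hh : pyDictEq r d with
        | false => rfl
        | true => exact absurd (pyDictEq_symm hh) (by simp [hd'])
      rw [hd', hrd]
      simpa [inEq] using ih (b + 1)

theorem dictIndexAux_lt (r : List (String × String)) :
    ∀ (l : List (List (String × String))) (b i : Int),
      dictIndexAux_py r l b = some i → i < b + l.length := by
  intro l
  induction l with
  | nil => intro b i h; simp [dictIndexAux_py] at h
  | cons d t ih =>
    intro b i h
    simp only [dictIndexAux_py] at h
    split at h
    · simp at h; subst h; push_cast [List.length_cons]; omega
    · have := ih (b + 1) i h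
      simp at this ⊢
      omega

theorem dictIndexAux_append (r : List (String × String)) (rest : List (List (String × String))) :
    ∀ (pre : List (List (String × String))) (b : Int),
      dictIndexAux_py r (pre ++ rest) b =
        (match dictIndexAux_py r pre b with
          | some i => some i
          | none => dictIndexAux_py r rest (b + pre.length)) := by
  intro pre
  induction pre with
  | nil => intro b; simp [dictIndexAux_py]
  | cons d t ih =>
    intro b
    simp only [List.cons_append, dictIndexAux_py]
    by_cases hd : pyDictEq d r = true
    · simp [hd]
    · have hd' : pyDictEq d r = false := by simpa using hd
      rw [if_neg (by simp [hd']), if_neg (by simp [hd']), ih (b + 1)]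
      have harg : b + 1 + (t.length : Int) = b + (((d :: t).length : Nat) : Int) := by
        push_cast [List.length_cons]; omega
      rw [harg]

-- the filtered enumeration over the not-yet-processed suffix equals goSpec
theorem extras_eq_goSpec (kept held : List (List (String × String))) :
    ∀ (rest pre : List (List (String × String))), held = pre ++ rest →
      ((PySem.List.enumerate rest (pre.length : Int)).filter
        (fun p => !(kept.any (fun d => pyDictEq p.2 d)) && (dictIndexAux_py p.2 held 0 == some p.1))).map Prod.snd
        = goSpec kept pre rest := by
  intro rest
  induction rest with
  | nil => intro pre _; simp [PySem.List.enumerate_nil, goSpec]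
  | cons h t ih =>
    intro pre hheld
    rw [PySem.List.enumerate_cons]
    simp only [goSpec, List.filter_cons]
    rw [inEq_def]
    have hidx : dictIndexAux_py h held 0 =
        (match dictIndexAux_py h pre 0 with
          | some i => some i
          | none => dictIndexAux_py h (h :: t) (0 + (pre.length : Int))) := by
      rw [hheld]; exact dictIndexAux_append h (h :: t) pre 0
    have hcond : (dictIndexAux_py h held 0 == some ((pre.length : Nat) : Int)) = !(inEq h pre) := by
      by_cases hP : inEq h pre = true
      · obtain ⟨i, hi⟩ : ∃ i, dictIndexAux_py h pre 0 = some i := by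
          cases hdi : dictIndexAux_py h pre 0 with
          | none => rw [dictIndexAux_none_iff] at hdi; simp [hdi] at hP
          | some i => exact ⟨i, rfl⟩
        have hlt : i < (pre.length : Int) := by
          have := dictIndexAux_lt h pre 0 i hi
          omega
        rw [hidx, hi, hP]
        simp
        omega
      · have hP' : inEq h pre = false := by simpa using hP
        have hnone : dictIndexAux_py h pre 0 = none := (dictIndexAux_none_iff h pre 0).mpr hP'
        rw [hidx, hnone, hP']
        simp [dictIndexAux_py, pyDictEq_refl]
    rw [hcond]
    have hlen1 : ((pre.length : Int) + 1) = (((pre ++ [h]).length : Nat) : Int) := by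
      simp
    by_cases hc : (!(inEq h kept) && !(inEq h pre)) = true
    · rw [if_pos hc, if_pos hc]
      simp only [List.map_cons]
      congr 1
      rw [hlen1]
      exact ih (pre ++ [h]) (by simp [hheld])
    · rw [if_neg hc, if_neg hc, hlen1]
      exact ih (pre ++ [h]) (by simp [hheld])

-- ===== VERDICT (by name: the statement is the Claim_ definition above) =====
theorem diversify_recommendations_py_spec : Claim_equal_diversify_recommendations_py := by
  intro recs _
  unfold Spec_diversify_recommendations_py diversify_recommendations_py diversify_recommendations_py_alt
  by_cases h3 : recs.length ≤ 3
  · simp [h3]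
  · rw [if_neg h3, if_neg h3]
    rcases recs with _ | ⟨a, _ | ⟨b, _ | ⟨c, _ | ⟨d, rest⟩⟩⟩⟩
    · simp at h3
    · simp at h3
    · simp at h3
    · simp at h3
    · have hslice_to : PySem.List.slice (a :: b :: c :: d :: rest) none (some (3 : Int)) = [a, b, c] := by
        rw [PySem.List.slice_to _ (by norm_num)]
        simp
      have hslice_from : PySem.List.slice (a :: b :: c :: d :: rest) (some (3 : Int)) none = d :: rest := by
        rw [PySem.List.slice_from _ (by norm_num)]
        simp
      have hofl : PySem.Set.ofList ([a, b, c].map (fun r => pyRecGetD r "brand" "")) =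
          PySem.Set.add (PySem.Set.add (PySem.Set.add PySem.Set.empty (pyRecGetD a "brand" ""))
            (pyRecGetD b "brand" "")) (pyRecGetD c "brand" "") := rfl
      have hC : classifyC (a :: b :: c :: d :: rest) [] PySem.Set.empty [] =
          bClassify_py (d :: rest) [a, b, c]
            (PySem.Set.ofList ([a, b, c].map (fun r => pyRecGetD r "brand" ""))) [] := by
        rw [classifyC_start, hofl]
        exact classifyC_eq_bClassify (d :: rest) [a, b, c] _ [] (by simp)
      simp only [hslice_to, hslice_from]
      rw [← hC]
      have hpass1 : (passA_py (a :: b :: c :: d :: rest) [] PySem.Set.empty).1 =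
          (classifyC (a :: b :: c :: d :: rest) [] PySem.Set.empty []).1 := by
        rw [passA_eq_classifyC (a :: b :: c :: d :: rest) [] PySem.Set.empty []]
      rw [hpass1]
      rw [fillA_eq_foldl_held ((a :: b :: c :: d :: rest).length) (a :: b :: c :: d :: rest)
        [] PySem.Set.empty _ (fun r hr => hr)]
      have hlen := classifyC_length (a :: b :: c :: d :: rest) [] PySem.Set.empty []
      have hfold := foldA_eq_goSpec ((a :: b :: c :: d :: rest).length)
        (classifyC (a :: b :: c :: d :: rest) [] PySem.Set.empty []).1
        (classifyC (a :: b :: c :: d :: rest) [] PySem.Set.empty []).2.2 [] []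
        (by simp at hlen ⊢; omega) (by intro r; simp [inEq])
      simp only [List.append_nil] at hfold
      rw [hfold]
      congr 1
      have hex := extras_eq_goSpec (classifyC (a :: b :: c :: d :: rest) [] PySem.Set.empty []).1
        (classifyC (a :: b :: c :: d :: rest) [] PySem.Set.empty []).2.2
        (classifyC (a :: b :: c :: d :: rest) [] PySem.Set.empty []).2.2 [] (by simp)
      simpa using hex.symm
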